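-- pv_equiv track=rewrite | github.com/MightyHelper/ia-uncuyo-2023 | tp3-busquedas-no-informadas/code/test_runner.py | compact_path
-- ===== SOURCE A (Python) =====
-- def compact_path(path):
--     split = path.split(" ")
--     out = []
--     # Compact a a a a a to 5xa if cout > 10
--     count = 0
--     last = None
--     for x in split:
--         if x == last:
--             count += 1
--         else:
--             if last is not None:
--                 if count > 10:
--                     out.append(f"{count}x{last}")
--                 else:
--                     out.extend([last] * count)
--
--             last = x
--             count = 1
--     if last is not None:
--         out.append(f"{count}x{last}")
--     return " ".join(out)
-- ===== SOURCE B (Python) =====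
-- def compact_path(path):
--     # Phase 1: build the run-length groups of the space-separated tokens.
--     groups = []
--     for t in path.split(" "):
--         if groups and groups[-1][0] == t:
--             groups[-1][1] += 1
--         else:
--             groups.append([t, 1])
--     # Phase 2: emit; the final run is always written NxTok, earlier runs only when count > 10.
--     parts = []
--     n = len(groups)
--     for i, (tok, c) in enumerate(groups):
--         if i == n - 1 or c > 10:
--             parts.append(f"{c}x{tok}")
--         else:
--             parts.extend([tok] * c)
--     return " ".join(parts)
-- ===== Notes on version B (the rewrite author's own statement) =====
-- stated objective: alternative
-- what changed: A interleaves run detection and output emission in one stateful pass (count/last carried across iterations, plus a trailing flush); B separates the task into two phases: first build the complete list of (token, count) runs, then emit each run from that list, formatting the last run unconditionally and earlier runs only when the count exceeds 10.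
import Mathlib
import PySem

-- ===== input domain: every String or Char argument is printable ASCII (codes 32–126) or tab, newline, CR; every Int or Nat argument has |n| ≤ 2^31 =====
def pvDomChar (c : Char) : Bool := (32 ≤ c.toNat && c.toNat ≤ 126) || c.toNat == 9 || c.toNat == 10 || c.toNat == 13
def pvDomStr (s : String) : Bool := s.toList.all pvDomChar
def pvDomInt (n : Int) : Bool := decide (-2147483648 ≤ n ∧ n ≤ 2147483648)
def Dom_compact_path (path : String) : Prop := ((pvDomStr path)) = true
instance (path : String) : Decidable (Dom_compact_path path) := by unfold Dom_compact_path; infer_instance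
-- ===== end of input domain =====

-- B is an alternative decomposition of the same run-length compaction: build the runs first, then emit.
-- ===== PORT A =====
-- loop body of A's single interleaved pass, state = (out, count, last);
-- [last] * count ported as List.replicate count.toNat: count is only used when ≥ 1, where this is exact
def pvAStep (s : List String × Int × Option String) (x : String) : List String × Int × Option String :=
  if some x = s.2.2 then
    (s.1, s.2.1 + 1, s.2.2)
  else
    (match s.2.2 with
      | none => s.1
      | some l => if s.2.1 > 10 then s.1 ++ [PySem.Int.toStr s.2.1 ++ "x" ++ l]
                  else s.1 ++ List.replicate s.2.1.toNat l,
     1, some x)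

-- the trailing `if last is not None: out.append(f"{count}x{last}")`
def pvAFlush (s : List String × Int × Option String) : List String :=
  match s.2.2 with
  | none => s.1
  | some l => s.1 ++ [PySem.Int.toStr s.2.1 ++ "x" ++ l]

def compact_path (path : String) : String :=
  let split := (PySem.Str.split? path " ").getD []   -- sep ≠ "", so split? is always `some`
  PySem.Str.join " " (pvAFlush (split.foldl pvAStep ([], 0, none)))

-- ===== PORT B =====
-- phase-1 loop body: bump the last group's count or append a fresh (t, 1)
def pvBStep (groups : List (String × Int)) (t : String) : List (String × Int) :=
  match groups.getLast? with
  | some (tok, c) => if tok = t then groups.dropLast ++ [(tok, c + 1)] else groups ++ [(t, 1)]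
  | none => [(t, 1)]

-- phase-2 loop body (n = len(groups))
def pvBEmitStep (n : Int) (out : List String) (p : Int × String × Int) : List String :=
  if p.1 = n - 1 ∨ p.2.2 > 10 then out ++ [PySem.Int.toStr p.2.2 ++ "x" ++ p.2.1]
  else out ++ List.replicate p.2.2.toNat p.2.1

def compact_path_alt (path : String) : String :=
  let groups := ((PySem.Str.split? path " ").getD []).foldl pvBStep []
  let n : Int := groups.length
  PySem.Str.join " " ((PySem.List.enumerate groups).foldl (pvBEmitStep n) [])

-- ===== PRECONDITION & SPEC =====
def Spec_compact_path (path : String) (out : String) : Prop := out = compact_path_alt path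
instance (path : String) (out : String) : Decidable (Spec_compact_path path out) := by unfold Spec_compact_path; infer_instance

-- ===== CLAIM (what is proved, stated in full; the proofs are below) =====
def Claim_equal_compact_path : Prop := ∀ (path : String), Dom_compact_path path → Spec_compact_path path (compact_path path)

-- ===== LEMMAS AND PROOFS =====

-- canonical run-length grouping of a nonempty token list, scanning left to right
def pvRunsFrom (x : String) (c : Int) : List String → List (String × Int)
  | [] => [(x, c)]
  | y :: ys => if y = x then pvRunsFrom x (c + 1) ys else (x, c) :: pvRunsFrom y 1 ys

-- canonical emission: last run always formatted, earlier runs only when count > 10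
def pvEmit : List (String × Int) → List String
  | [] => []
  | [(t, c)] => [PySem.Int.toStr c ++ "x" ++ t]
  | (t, c) :: g :: rest =>
      (if c > 10 then [PySem.Int.toStr c ++ "x" ++ t] else List.replicate c.toNat t) ++ pvEmit (g :: rest)

theorem pvRunsFrom_ne_nil (x : String) (c : Int) (ys : List String) : pvRunsFrom x c ys ≠ [] := by
  induction ys generalizing x c with
  | nil => simp [pvRunsFrom]
  | cons y ys ih => simp only [pvRunsFrom]; split <;> simp [ih]

theorem pvEmit_cons (t : String) (c : Int) (rest : List (String × Int)) (h : rest ≠ []) :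
    pvEmit ((t, c) :: rest) =
      (if c > 10 then [PySem.Int.toStr c ++ "x" ++ t] else List.replicate c.toNat t) ++ pvEmit rest := by
  cases rest with
  | nil => exact absurd rfl h
  | cons g gs => rfl

theorem pvA_fold (ys : List String) : ∀ (x : String) (c : Int) (out : List String),
    pvAFlush (ys.foldl pvAStep (out, c, some x)) = out ++ pvEmit (pvRunsFrom x c ys) := by
  induction ys with
  | nil => intro x c out; simp [pvAFlush, pvRunsFrom, pvEmit]
  | cons y ys ih =>
    intro x c out
    by_cases h : y = x
    · subst h
      have : pvAStep (out, c, some y) y = (out, c + 1, some y) := by simp [pvAStep]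
      simp only [List.foldl_cons, this, pvRunsFrom, if_pos]
      exact ih y (c + 1) out
    · have hs : pvAStep (out, c, some x) y =
        (if c > 10 then out ++ [PySem.Int.toStr c ++ "x" ++ x] else out ++ List.replicate c.toNat x,
         1, some y) := by simp [pvAStep, h]
      simp only [List.foldl_cons, hs, pvRunsFrom, if_neg h]
      rw [ih y 1, pvEmit_cons _ _ _ (pvRunsFrom_ne_nil y 1 ys)]
      split <;> simp

theorem pvB_fold (ts : List String) : ∀ (gs : List (String × Int)) (x : String) (c : Int),
    ts.foldl pvBStep (gs ++ [(x, c)]) = gs ++ pvRunsFrom x c ts := by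
  induction ts with
  | nil => intro gs x c; simp [pvRunsFrom]
  | cons t ts ih =>
    intro gs x c
    have hlast : (gs ++ [(x, c)]).getLast? = some (x, c) := by simp
    by_cases h : x = t
    · subst h
      have hstep : pvBStep (gs ++ [(x, c)]) x = gs ++ [(x, c + 1)] := by
        simp [pvBStep, hlast]
      simp only [List.foldl_cons, hstep, pvRunsFrom, if_pos]
      exact ih gs x (c + 1)
    · have hstep : pvBStep (gs ++ [(x, c)]) t = (gs ++ [(x, c)]) ++ [(t, 1)] := by
        simp [pvBStep, hlast, h]
      have hne : ¬ (t = x) := fun e => h e.symm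
      simp only [List.foldl_cons, hstep, pvRunsFrom, if_neg hne]
      rw [ih (gs ++ [(x, c)]) t 1]
      simp

theorem pvB_emit (gs : List (String × Int)) : ∀ (k : Int) (n : Int) (out : List String),
    n = k + gs.length →
    (PySem.List.enumerate gs k).foldl (pvBEmitStep n) out = out ++ pvEmit gs := by
  induction gs with
  | nil => intro k n out _; simp [PySem.List.enumerate_nil, pvEmit]
  | cons g gs ih =>
    intro k n out hn
    obtain ⟨t, c⟩ := g
    rw [PySem.List.enumerate_cons, List.foldl_cons]
    cases gs with
    | nil =>
      have hk : k = n - 1 := by simp at hn; omega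
      simp [pvBEmitStep, hk, PySem.List.enumerate_nil, pvEmit]
    | cons g' gs' =>
      have hk : ¬ (k = n - 1) := by simp at hn; omega
      have hstep : pvBEmitStep n out (k, t, c) =
          out ++ (if c > 10 then [PySem.Int.toStr c ++ "x" ++ t] else List.replicate c.toNat t) := by
        simp only [pvBEmitStep]
        by_cases hc : c > 10 <;> simp [hk, hc]
      rw [hstep, ih (k + 1) n _ (by simp at hn ⊢; omega)]
      obtain ⟨t', c'⟩ := g'
      simp only [pvEmit, List.append_assoc]

-- ===== VERDICT (by name: the statement is the Claim_ definition above) =====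
theorem compact_path_spec : Claim_equal_compact_path := by
  intro path _
  unfold Spec_compact_path compact_path compact_path_alt
  cases hts : (PySem.Str.split? path " ").getD [] with
  | nil => simp [pvAFlush]
  | cons x xs =>
    have hstep0 : pvAStep ([], 0, none) x = ([], 1, some x) := by simp [pvAStep]
    have hA : pvAFlush ((x :: xs).foldl pvAStep ([], 0, none)) = pvEmit (pvRunsFrom x 1 xs) := by
      rw [List.foldl_cons, hstep0]
      simpa using pvA_fold xs x 1 []
    have hB : (x :: xs).foldl pvBStep [] = pvRunsFrom x 1 xs := by
      have hstep : pvBStep [] x = [(x, 1)] := by simp [pvBStep]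
      rw [List.foldl_cons, hstep]
      simpa using pvB_fold xs [] x 1
    simp only [hA, hB]
    rw [pvB_emit (pvRunsFrom x 1 xs) 0 ((pvRunsFrom x 1 xs).length : Int) [] (by simp)]
    simp
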